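-- pv_equiv track=rewrite | github.com/Portfolio-CMR/Self-stats-analytics-visualizer | self_stats/munger/impute_time_data.py | identify_activity_windows
-- ===== SOURCE A (Python) =====
-- from typing import List, Optional, Tuple
--
-- def identify_activity_windows(differences: List[Optional[float]]) -> List[Tuple[int, int]]:
--     """
--     Find index ranges in a list that are fully enclosed by None values on both ends.
--
--     Parameters:
--         data (List[Optional[float]]): A list containing numbers and None types.
--
--     Returns:
--         List[Tuple[int, int]]: A list of tuples, each representing the start and end index of sequences enclosed by None.
--     """
--     windows = []
--     start = None
--
--     # Check that a window starts only if preceded by None and not already started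
--     for i in range(1, len(differences)):
--         if differences[i] is not None and differences[i-1] is None:
--             start = i  # Start of a new range if preceded by None
--         elif differences[i] is None and start is not None:
--             if i-1 > start:  # Check if the range has more than one element
--                 windows.append((int(start), int(i - 1)))
--             start = None  # End the current range
--
--     return windows
-- ===== SOURCE B (Python) =====
-- def identify_activity_windows(differences):
--     nones = [i for i, x in enumerate(differences) if x is None]
--     return [(p + 1, q - 1) for p, q in zip(nones, nones[1:]) if q - 1 > p + 1]
-- ===== Notes on version B (the rewrite author's own statement) =====
-- stated objective: simpler
-- what changed: Replaces the stateful element-by-element scan (open-window start variable) by first collecting the indices of all None values and emitting a window for each consecutive pair of None indices that encloses at least two non-None elements.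
import Mathlib
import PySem

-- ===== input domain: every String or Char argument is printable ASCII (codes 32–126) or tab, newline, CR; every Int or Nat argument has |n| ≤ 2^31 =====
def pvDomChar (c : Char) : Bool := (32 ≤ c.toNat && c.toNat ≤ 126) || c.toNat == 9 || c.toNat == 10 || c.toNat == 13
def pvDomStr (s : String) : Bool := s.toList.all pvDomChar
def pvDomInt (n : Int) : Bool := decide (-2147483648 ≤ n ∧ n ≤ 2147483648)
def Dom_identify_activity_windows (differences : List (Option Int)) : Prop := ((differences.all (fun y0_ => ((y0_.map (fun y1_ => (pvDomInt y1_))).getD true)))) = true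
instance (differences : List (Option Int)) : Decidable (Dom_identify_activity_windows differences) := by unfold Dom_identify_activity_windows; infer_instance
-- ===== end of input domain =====

-- B replaces A's stateful scan (open-window "start" variable) by collecting the None
-- indices once and pairing consecutive ones; objective: simpler.

-- ===== PORT A =====
-- loop body of A's for-loop; state = (windows, start)
def pvStepA (l : List (Option Int)) (st : List (Int × Int) × Option Int) (i : Int) :
    List (Int × Int) × Option Int :=
  if PySem.List.pyGetD l i none ≠ none ∧ PySem.List.pyGetD l (i - 1) none = none then
    (st.1, some i)
  else if PySem.List.pyGetD l i none = none ∧ st.2.isSome then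
    ((match st.2 with
      | some s => if i - 1 > s then st.1 ++ [(s, i - 1)] else st.1
      | none => st.1), none)
  else st

def identify_activity_windows (differences : List (Option Int)) : List (Int × Int) :=
  ((PySem.List.pyRange 1 (differences.length : Int) 1).foldl (pvStepA differences) ([], none)).1

-- ===== PORT B =====
def identify_activity_windows_alt (differences : List (Option Int)) : List (Int × Int) :=
  let nones := (PySem.List.enumerate differences 0).filterMap
    (fun p => if p.2 = none then some p.1 else none)
  (nones.zip nones.tail).filterMap
    (fun p => if p.2 - 1 > p.1 + 1 then some (p.1 + 1, p.2 - 1) else none)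

-- ===== PRECONDITION & SPEC =====
def Spec_identify_activity_windows (differences : List (Option Int)) (out : List (Int × Int)) : Prop := out = identify_activity_windows_alt differences
instance (differences : List (Option Int)) (out : List (Int × Int)) : Decidable (Spec_identify_activity_windows differences out) := by unfold Spec_identify_activity_windows; infer_instance

-- ===== CLAIM (what is proved, stated in full; the proofs are below) =====
def Claim_equal_identify_activity_windows : Prop := ∀ (differences : List (Option Int)), Dom_identify_activity_windows differences → Spec_identify_activity_windows differences (identify_activity_windows differences)

-- ===== LEMMAS AND PROOFS =====

-- windows produced from a list of None-indices (B's second comprehension)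
def pvPairsOut (ns : List Int) : List (Int × Int) :=
  (ns.zip ns.tail).filterMap
    (fun p => if p.2 - 1 > p.1 + 1 then some (p.1 + 1, p.2 - 1) else none)

-- indices (from offset s) of the None entries of xs
def pvNones (s : Int) : List (Option Int) → List Int
  | [] => []
  | x :: xs => (if x = none then [s] else []) ++ pvNones (s + 1) xs

theorem pvPairsOut_nil : pvPairsOut [] = [] := rfl

theorem pvPairsOut_single (p : Int) : pvPairsOut [p] = [] := rfl

theorem pvPairsOut_cons2 (p q : Int) (t : List Int) :
    pvPairsOut (p :: q :: t)
      = (if q - 1 > p + 1 then [(p + 1, q - 1)] else []) ++ pvPairsOut (q :: t) := by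
  simp only [pvPairsOut, List.zip_cons_cons, List.tail_cons, List.filterMap_cons]
  split_ifs <;> simp

theorem pvEnum_filterMap (xs : List (Option Int)) (s : Int) :
    (PySem.List.enumerate xs s).filterMap (fun p => if p.2 = none then some p.1 else none)
      = pvNones s xs := by
  induction xs generalizing s with
  | nil => simp [pvNones, PySem.List.enumerate_nil]
  | cons x xs ih =>
    simp only [PySem.List.enumerate_cons, List.filterMap_cons, pvNones, ih]
    cases x <;> simp

-- the invariant of A's scan: the fold from index k equals the already accumulated
-- windows plus the windows B extracts from the remaining None indices
theorem pvFoldA (l : List (Option Int)) :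
    ∀ (rest : List (Option Int)) (k : Nat) (prev : Option Int) (w : List (Int × Int))
      (start : Option Int),
      1 ≤ k → l.drop k = rest → l.getD (k - 1) none = prev →
      (∀ s, start = some s → prev ≠ none) →
      ((PySem.List.pyRange (k : Int) (l.length : Int) 1).foldl (pvStepA l) (w, start)).1
        = w ++ pvPairsOut
            ((match start with
              | some s => [s - 1]
              | none => if prev = none then [(k : Int) - 1] else []) ++ pvNones (k : Int) rest) := by
  intro rest
  induction rest with
  | nil =>
    intro k prev w start hk hdrop _ _
    have hlen : l.length ≤ k := by
      by_contra h
      have := List.drop_eq_nil_iff.mp hdrop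
      omega
    rw [PySem.List.pyRange_one_eq_nil (by exact_mod_cast hlen)]
    simp only [List.foldl_nil, pvNones, List.append_nil]
    cases start with
    | some s => simp [pvPairsOut_single]
    | none => split_ifs <;> simp [pvPairsOut_single, pvPairsOut_nil]
  | cons x xs ih =>
    intro k prev w start hk hdrop hprev hinv
    have hklt : k < l.length := by
      by_contra h
      rw [List.drop_eq_nil_iff.mpr (by omega)] at hdrop
      exact (List.cons_ne_nil x xs) hdrop.symm
    have hx : l.getD k none = x := by
      have h0 : (l.drop k).getD 0 none = x := by rw [hdrop]; rfl
      simpa [List.getD_eq_getElem?_getD, List.getElem?_drop] using h0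
    have hdrop' : l.drop (k + 1) = xs := by
      have := congrArg List.tail hdrop
      simpa [List.tail_drop] using this
    have hgk : PySem.List.pyGetD l (k : Int) none = x := by
      rw [PySem.List.pyGetD_natCast]; exact hx
    have hgk1 : PySem.List.pyGetD l ((k : Int) - 1) none = prev := by
      have he : ((k : Int) - 1) = ((k - 1 : Nat) : Int) := by omega
      rw [he, PySem.List.pyGetD_natCast]; exact hprev
    have hprev' : l.getD (k + 1 - 1) none = x := by rw [Nat.add_sub_cancel]; exact hx
    have hcast : ((k + 1 : Nat) : Int) = (k : Int) + 1 := by push_cast; ring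
    rw [PySem.List.pyRange_one_cons (by exact_mod_cast hklt)]
    simp only [List.foldl_cons]
    by_cases hxn : x = none
    · subst hxn
      cases start with
      | some s =>
        have hprevne : prev ≠ none := hinv s rfl
        have hstep : pvStepA l (w, some s) (k : Int)
            = ((if (k : Int) - 1 > s then w ++ [(s, (k : Int) - 1)] else w), none) := by
          simp [pvStepA, hgk, hgk1, hprevne]
        rw [hstep]
        have hrec := ih (k + 1) none
          (if (k : Int) - 1 > s then w ++ [(s, (k : Int) - 1)] else w) none
          (by omega) hdrop' hprev' (by simp)
        rw [hcast] at hrec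
        norm_num at hrec
        rw [hrec, pvNones]
        norm_num
        rw [pvPairsOut_cons2]
        have he : s - 1 + 1 = s := by ring
        rw [he]
        split_ifs <;> simp
      | none =>
        have hstep : pvStepA l (w, none) (k : Int) = (w, none) := by
          simp [pvStepA, hgk, hgk1]
        rw [hstep]
        have hrec := ih (k + 1) none w none (by omega) hdrop' hprev' (by simp)
        rw [hcast] at hrec
        norm_num at hrec
        rw [hrec, pvNones]
        norm_num
        by_cases hpn : prev = none
        · simp only [hpn, if_true, List.singleton_append]
          rw [pvPairsOut_cons2]
          simp
        · simp [hpn]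
    · by_cases hpn : prev = none
      · have hstep : pvStepA l (w, start) (k : Int) = (w, some (k : Int)) := by
          simp [pvStepA, hgk, hgk1, hxn, hpn]
        rw [hstep]
        have hrec := ih (k + 1) x w (some (k : Int)) (by omega) hdrop' hprev'
          (fun s hs => hxn)
        rw [hcast] at hrec
        rw [hrec, pvNones]
        have hs0 : start = none := by
          cases start with
          | none => rfl
          | some s => exact absurd hpn (hinv s rfl)
        subst hs0
        simp [hxn, hpn]
      · have hstep : pvStepA l (w, start) (k : Int) = (w, start) := by
          cases start with
          | none => simp [pvStepA, hgk, hgk1, hxn, hpn]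
          | some s => simp [pvStepA, hgk, hgk1, hxn, hpn]
        rw [hstep]
        have hrec := ih (k + 1) x w start (by omega) hdrop' hprev' (fun s hs => hxn)
        rw [hcast] at hrec
        rw [hrec, pvNones]
        cases start with
        | some s => simp [hxn]
        | none => simp [hxn, hpn]

-- ===== VERDICT (by name: the statement is the Claim_ definition above) =====
theorem identify_activity_windows_spec : Claim_equal_identify_activity_windows := by
  intro differences _
  unfold Spec_identify_activity_windows
  unfold identify_activity_windows identify_activity_windows_alt
  rw [pvEnum_filterMap]
  cases differences with
  | nil => rfl
  | cons x xs =>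
    have h := pvFoldA (x :: xs) xs 1 x [] none (by omega) (by simp)
      (by simp) (by simp)
    simp only [Nat.cast_one] at h
    rw [h]
    show pvPairsOut _ = pvPairsOut (pvNones 0 (x :: xs))
    rw [pvNones]
    norm_num
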